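-- pv_equiv track=rewrite | github.com/ziyangw/qdmmSpider | EasySpider/spiders/helpers.py | get_intro
-- ===== SOURCE A (Python) =====
-- def get_intro(L):
-- 	if len(L) < 2: return L
--
-- 	first_line = L[0]
-- 	result = [first_line]
--
-- 	for line in L[1:]:
-- 		if line == first_line:
-- 			break
-- 		else:
-- 			result.append(line)
--
-- 	return result
-- ===== SOURCE B (Python) =====
-- def get_intro(L):
-- 	if len(L) < 2:
-- 		return L
-- 	try:
-- 		idx = L.index(L[0], 1)
-- 	except ValueError:
-- 		return L
-- 	return L[:idx]
-- ===== Notes on version B (the rewrite author's own statement) =====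
-- stated objective: idiomatic
-- what changed: Replaces the accumulate-while-scanning loop with computing the cutoff once via L.index(L[0], 1) (ValueError means no repeat, return L) and returning the slice L[:idx].
import Mathlib
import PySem

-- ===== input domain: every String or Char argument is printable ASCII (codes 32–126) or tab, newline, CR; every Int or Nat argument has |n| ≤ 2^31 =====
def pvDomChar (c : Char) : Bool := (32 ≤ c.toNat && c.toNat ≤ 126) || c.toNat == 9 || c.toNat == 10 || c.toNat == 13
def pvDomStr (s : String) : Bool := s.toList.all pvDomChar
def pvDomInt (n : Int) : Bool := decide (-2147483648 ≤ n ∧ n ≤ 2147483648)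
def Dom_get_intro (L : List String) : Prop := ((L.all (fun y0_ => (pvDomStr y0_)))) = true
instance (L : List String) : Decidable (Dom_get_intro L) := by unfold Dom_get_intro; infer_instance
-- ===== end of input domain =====

-- B computes the cutoff once with list.index and slices, instead of A's accumulate-while-scanning loop (idiomatic; same cost).

-- ===== PORT A =====
-- the 'for line in L[1:]' loop: result accumulator, break on line == first_line
def getIntroLoop (first : String) : List String → List String → List String
  | [], result => result
  | line :: rest, result =>
    if line == first then result else getIntroLoop first rest (result ++ [line])

def get_intro (L : List String) : List String :=
  if L.length < 2 then L
  else
    let first := L.headD ""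
    getIntroLoop first (PySem.List.slice L (some 1) none) [first]

-- ===== PORT B =====
-- L.index(L[0], 1): first index ≥ 1 of L[0] in L, none = ValueError
def indexFrom1 (L : List String) (v : String) : Option Nat :=
  (PySem.List.index? L.tail v).map (· + 1)

def get_intro_alt (L : List String) : List String :=
  if L.length < 2 then L
  else
    match indexFrom1 L (L.headD "") with
    | none => L
    | some idx => PySem.List.slice L none (some (idx : Int))

-- ===== PRECONDITION & SPEC =====
def Spec_get_intro (L : List String) (out : List String) : Prop := out = get_intro_alt L
instance (L : List String) (out : List String) : Decidable (Spec_get_intro L out) := by unfold Spec_get_intro; infer_instance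

-- ===== CLAIM (what is proved, stated in full; the proofs are below) =====
def Claim_equal_get_intro : Prop := ∀ (L : List String), Dom_get_intro L → Spec_get_intro L (get_intro L)

-- ===== LEMMAS AND PROOFS =====

lemma getIntroLoop_eq (first : String) (t res : List String) :
    getIntroLoop first t res = res ++ t.takeWhile (fun x => !(x == first)) := by
  induction t generalizing res with
  | nil => simp [getIntroLoop]
  | cons x xs ih =>
    by_cases h : x = first
    · simp [getIntroLoop, h]
    · simp [getIntroLoop, h, ih, List.takeWhile_cons]

lemma takeWhile_ne_of_not_mem (v : String) (t : List String) (h : v ∉ t) :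
    t.takeWhile (fun x => !(x == v)) = t := by
  induction t with
  | nil => rfl
  | cons x xs ih =>
    simp only [List.mem_cons, not_or] at h
    simp [show ¬x = v from fun e => h.1 e.symm, ih h.2]

lemma takeWhile_ne_append (v : String) (pre suf : List String) (h : v ∉ pre) :
    (pre ++ v :: suf).takeWhile (fun x => !(x == v)) = pre := by
  induction pre with
  | nil => simp [List.takeWhile_cons]
  | cons x xs ih =>
    simp only [List.mem_cons, not_or] at h
    simp [show ¬x = v from fun e => h.1 e.symm, ih h.2]

-- ===== VERDICT (by name: the statement is the Claim_ definition above) =====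
theorem get_intro_spec : Claim_equal_get_intro := by
  intro L _
  unfold Spec_get_intro get_intro get_intro_alt
  by_cases hlen : L.length < 2
  · simp [hlen]
  · simp only [hlen, if_false]
    match L with
    | [] => simp at hlen
    | a :: t =>
      simp only [List.headD_cons, PySem.List.slice_from_one, List.tail_cons]
      rw [getIntroLoop_eq]
      unfold indexFrom1
      simp only [List.tail_cons]
      cases hidx : PySem.List.index? t a with
      | none =>
        rw [PySem.List.index?_eq_none_iff] at hidx
        simp [takeWhile_ne_of_not_mem a t hidx]
      | some k =>
        rw [PySem.List.index?_eq_some_iff] at hidx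
        obtain ⟨pre, suf, ht, hk, hmem⟩ := hidx
        subst ht hk
        rw [takeWhile_ne_append a pre suf hmem]
        simp only [Option.map_some]
        rw [PySem.List.slice_to_natCast]
        simp
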